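-- pv_equiv track=rewrite | github.com/dinhgia2106/RecommendKeyboard | src/training.py | _extract_syllable_patterns
-- ===== SOURCE A (Python) =====
-- from typing import List, Tuple, Dict, Any
--
-- def _extract_syllable_patterns(word: str) -> List[str]:
--     """Extract Vietnamese syllable patterns from a word."""
--     # Simplified Vietnamese syllable detection
--     vowels = set('aeiouuy')
--     consonants = set('bcdfghjklmnpqrstvwxz')
--
--     syllables = []
--     current_syllable = ""
--
--     for char in word:
--         current_syllable += char
--         # Simple heuristic: vowel followed by consonant ends syllable
--         if len(current_syllable) >= 2 and char in consonants:
--             if current_syllable[-2] in vowels: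
--                 syllables.append(current_syllable)
--                 current_syllable = ""
--
--     if current_syllable:
--         syllables.append(current_syllable)
--
--     return syllables
-- ===== SOURCE B (Python) =====
-- def _extract_syllable_patterns(word):
--     """Extract Vietnamese syllable patterns from a word."""
--     vowels = set('aeiouuy')
--     consonants = set('bcdfghjklmnpqrstvwxz')
--
--     parts = []
--     start = 0
--     # a syllable boundary falls right after position i exactly when
--     # word[i] is a consonant and word[i-1] is a vowel
--     for i in range(1, len(word)):
--         if word[i] in consonants and word[i - 1] in vowels:
--             parts.append(word[start:i + 1])
--             start = i + 1
--     if start < len(word):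
--         parts.append(word[start:])
--     return parts
-- ===== Notes on version B (the rewrite author's own statement) =====
-- stated objective: alternative
-- what changed: Replaces A's running accumulator string (rebuilt via repeated concatenation and reset on each cut) by a purely index-based scan: the cut decision is local (word[i] consonant after word[i-1] vowel), so B walks indices 1..len-1, records the last cut position and emits each syllable as a single slice word[start:i+1], plus the tail slice.
import Mathlib
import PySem

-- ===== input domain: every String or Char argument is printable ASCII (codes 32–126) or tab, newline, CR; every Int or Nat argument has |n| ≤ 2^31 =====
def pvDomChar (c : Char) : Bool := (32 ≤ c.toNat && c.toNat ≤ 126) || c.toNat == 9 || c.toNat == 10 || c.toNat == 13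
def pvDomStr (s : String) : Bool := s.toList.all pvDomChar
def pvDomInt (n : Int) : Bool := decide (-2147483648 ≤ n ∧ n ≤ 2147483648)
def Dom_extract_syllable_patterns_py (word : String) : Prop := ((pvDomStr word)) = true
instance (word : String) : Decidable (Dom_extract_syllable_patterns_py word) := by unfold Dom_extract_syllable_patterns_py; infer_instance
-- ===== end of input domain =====

-- B replaces A's running accumulator string by an index-based scan emitting each syllable as one slice (alternative decomposition).

-- shared constants: vowels = set('aeiouuy'), consonants = set('bcdfghjklmnpqrstvwxz')
def pvVowels : PySem.Set Char := PySem.Set.ofList "aeiouuy".toList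
def pvConsonants : PySem.Set Char := PySem.Set.ofList "bcdfghjklmnpqrstvwxz".toList

-- ===== PORT A =====
-- one step of A's for-loop; state = (syllables, current_syllable as List Char)
def pvAstep (st : List String × List Char) (c : Char) : List String × List Char :=
  let cur := st.2 ++ [c]
  if 2 ≤ cur.length ∧ PySem.Set.contains pvConsonants c then
    if PySem.Set.contains pvVowels (PySem.List.pyGetD cur (-2) c) then
      (st.1 ++ [String.ofList cur], [])
    else (st.1, cur)
  else (st.1, cur)

def extract_syllable_patterns_py (word : String) : List String :=
  let r := word.toList.foldl pvAstep ([], [])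
  if r.2 = [] then r.1 else r.1 ++ [String.ofList r.2]

-- ===== PORT B =====
-- one step of B's for-loop over i in range(1, len(word)); state = (parts, start)
def pvBstep (cs : List Char) (st : List String × Int) (i : Int) : List String × Int :=
  if PySem.Set.contains pvConsonants (PySem.List.pyGetD cs i ' ') ∧
     PySem.Set.contains pvVowels (PySem.List.pyGetD cs (i - 1) ' ') then
    (st.1 ++ [String.ofList (PySem.List.slice cs (some st.2) (some (i + 1)))], i + 1)
  else st

def extract_syllable_patterns_py_alt (word : String) : List String :=
  let cs := word.toList
  let r := (PySem.List.pyRange 1 (cs.length : Int) 1).foldl (pvBstep cs) ([], 0)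
  if r.2 < (cs.length : Int) then r.1 ++ [String.ofList (PySem.List.slice cs (some r.2) none)] else r.1

-- ===== PRECONDITION & SPEC =====
def Spec_extract_syllable_patterns_py (word : String) (out : List String) : Prop := out = extract_syllable_patterns_py_alt word
instance (word : String) (out : List String) : Decidable (Spec_extract_syllable_patterns_py word out) := by unfold Spec_extract_syllable_patterns_py; infer_instance

-- ===== CLAIM (what is proved, stated in full; the proofs are below) =====
def Claim_equal_extract_syllable_patterns_py : Prop := ∀ (word : String), Dom_extract_syllable_patterns_py word → Spec_extract_syllable_patterns_py word (extract_syllable_patterns_py word)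

-- ===== LEMMAS AND PROOFS =====

-- the two character classes are disjoint
lemma pv_disjoint (c : Char) (h : PySem.Set.contains pvConsonants c = true) :
    PySem.Set.contains pvVowels c = false := by
  rw [PySem.Set.contains_iff] at h
  rw [show pvConsonants = ['b','c','d','f','g','h','j','k','l','m','n','p','q','r','s','t','v','w','x','z'] from by decide] at h
  simp only [List.mem_cons, List.not_mem_nil, or_false] at h
  rcases h with rfl|rfl|rfl|rfl|rfl|rfl|rfl|rfl|rfl|rfl|rfl|rfl|rfl|rfl|rfl|rfl|rfl|rfl|rfl|rfl <;> decide

-- finishing steps of the two loops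
def pvAfin (r : List String × List Char) : List String :=
  if r.2 = [] then r.1 else r.1 ++ [String.ofList r.2]
def pvBfin (cs : List Char) (r : List String × Int) : List String :=
  if r.2 < (cs.length : Int) then r.1 ++ [String.ofList (PySem.List.slice cs (some r.2) none)] else r.1

-- master loop lemma: after processing the first k characters, A's state is
-- (syls, cs[start:k]) and B's state is (syls, start); the remaining runs agree.
lemma pv_key (cs : List Char) : ∀ (j k start : Nat) (syls : List String),
    cs.length - k = j → k ≤ cs.length → start ≤ k →
    (start = k → 0 < k ∧ PySem.Set.contains pvConsonants (cs.getD (k - 1) ' ') = true) →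
    pvAfin ((cs.drop k).foldl pvAstep (syls, (cs.drop start).take (k - start)))
    =
    pvBfin cs ((PySem.List.pyRange (k : Int) (cs.length : Int) 1).foldl (pvBstep cs) (syls, (start : Int))) := by
  intro j
  induction j with
  | zero =>
    intro k start syls hj hk hs hcut
    have hkl : k = cs.length := by omega
    subst hkl
    rw [List.drop_length, PySem.List.pyRange_one_eq_nil (by omega)]
    simp only [List.foldl_nil, pvAfin, pvBfin]
    by_cases hse : start = cs.length
    · subst hse
      simp [List.drop_length]
    · have hlt : start < cs.length := by omega
      rw [List.take_of_length_le (by simp)]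
      rw [if_neg (by simp only [List.drop_eq_nil_iff]; omega), if_pos (by exact_mod_cast hlt)]
      rw [PySem.List.slice_from_natCast]
  | succ n ih =>
    intro k start syls hj hk hs hcut
    have hklt : k < cs.length := by omega
    have hk1 : 0 < k := by
      rcases Nat.lt_or_ge start k with h | h
      · omega
      · exact (hcut (by omega)).1
    -- the characters at k and k-1
    have hgk : PySem.List.pyGetD cs (k : Int) ' ' = cs[k] := by
      rw [PySem.List.pyGetD_natCast, List.getD_eq_getElem _ _ hklt]
    have hgk1 : PySem.List.pyGetD cs ((k : Int) - 1) ' ' = cs[k - 1] := by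
      rw [show (k : Int) - 1 = ((k - 1 : Nat) : Int) by omega]
      rw [PySem.List.pyGetD_natCast, List.getD_eq_getElem _ _ (by omega)]
    -- A's step: the new current syllable
    have hcur : (cs.drop start).take (k - start) ++ [cs[k]] = (cs.drop start).take (k + 1 - start) := by
      rw [show k + 1 - start = (k - start) + 1 by omega, List.take_add_one]
      congr 1
      rw [List.getElem?_drop, show start + (k - start) = k by omega,
        List.getElem?_eq_getElem hklt]
      rfl
    have hcurlen : ((cs.drop start).take (k + 1 - start)).length = k + 1 - start := by
      simp; omega
    have hdropk : cs.drop k = cs[k] :: cs.drop (k + 1) := List.drop_eq_getElem_cons hklt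
    rw [hdropk, List.foldl_cons, PySem.List.pyRange_one_cons (by exact_mod_cast hklt), List.foldl_cons]
    by_cases hbc : PySem.Set.contains pvConsonants cs[k] = true ∧ PySem.Set.contains pvVowels cs[k - 1] = true
    · -- a cut happens at position k
      have hsk : start < k := by
        by_contra hne
        have hse : start = k := by omega
        have := (hcut hse).2
        rw [List.getD_eq_getElem _ _ (by omega)] at this
        have := pv_disjoint _ this
        rw [this] at hbc
        exact absurd hbc.2 (by simp)
      have h2 : 2 ≤ ((cs.drop start).take (k - start) ++ [cs[k]]).length := by
        rw [hcur, hcurlen]; omega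
      have hneg2 : PySem.List.pyGetD ((cs.drop start).take (k - start) ++ [cs[k]]) (-2) cs[k] = cs[k - 1] := by
        rw [hcur, PySem.List.pyGetD_neg_ofNat _ 2 _ (by omega) (by rw [hcurlen]; omega)]
        simp only [List.length_take, List.length_drop, List.getElem_take, List.getElem_drop]
        congr 1; omega
      have hA : pvAstep (syls, (cs.drop start).take (k - start)) cs[k]
          = (syls ++ [String.ofList ((cs.drop start).take (k + 1 - start))], []) := by
        simp only [pvAstep]
        rw [if_pos ⟨h2, hbc.1⟩, hneg2, if_pos hbc.2, hcur]
      have hB : pvBstep cs (syls, (start : Int)) (k : Int)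
          = (syls ++ [String.ofList ((cs.drop start).take (k + 1 - start))], (k : Int) + 1) := by
        simp only [pvBstep]
        rw [hgk, hgk1, if_pos hbc]
        rw [show (k : Int) + 1 = ((k + 1 : Nat) : Int) by omega, PySem.List.slice_natCast]
      rw [hA, hB]
      have := ih (k + 1) (k + 1) (syls ++ [String.ofList ((cs.drop start).take (k + 1 - start))])
        (by omega) (by omega) (by omega)
        (fun _ => ⟨by omega, by
          simp only [Nat.add_sub_cancel]
          rw [List.getD_eq_getElem _ _ hklt]; exact hbc.1⟩)
      rw [Nat.sub_self, List.take_zero] at this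
      rw [show (k : Int) + 1 = ((k + 1 : Nat) : Int) by omega]
      exact this
    · -- no cut at position k
      have hA : pvAstep (syls, (cs.drop start).take (k - start)) cs[k]
          = (syls, (cs.drop start).take (k + 1 - start)) := by
        simp only [pvAstep]
        by_cases hc : PySem.Set.contains pvConsonants cs[k] = true
        · by_cases hlen : 2 ≤ ((cs.drop start).take (k - start) ++ [cs[k]]).length
          · have hsk : start < k := by
              rw [hcur, hcurlen] at hlen; omega
            have hneg2 : PySem.List.pyGetD ((cs.drop start).take (k - start) ++ [cs[k]]) (-2) cs[k] = cs[k - 1] := by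
              rw [hcur, PySem.List.pyGetD_neg_ofNat _ 2 _ (by omega) (by rw [hcurlen]; rw [hcur, hcurlen] at hlen; omega)]
              simp only [List.length_take, List.length_drop, List.getElem_take, List.getElem_drop]
              congr 1; omega
            have hv : ¬ PySem.Set.contains pvVowels cs[k - 1] = true := fun hv => hbc ⟨hc, hv⟩
            rw [if_pos ⟨hlen, hc⟩, hneg2, if_neg hv, hcur]
          · rw [if_neg (by tauto), hcur]
        · rw [if_neg (by tauto), hcur]
      have hB : pvBstep cs (syls, (start : Int)) (k : Int) = (syls, (start : Int)) := by
        simp only [pvBstep]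
        rw [hgk, hgk1, if_neg hbc]
      rw [hA, hB]
      have := ih (k + 1) start syls (by omega) (by omega) (by omega) (by omega)
      rw [show (k : Int) + 1 = ((k + 1 : Nat) : Int) by omega]
      exact this

-- ===== VERDICT (by name: the statement is the Claim_ definition above) =====
theorem extract_syllable_patterns_py_spec : Claim_equal_extract_syllable_patterns_py := by
  intro word _
  unfold Spec_extract_syllable_patterns_py extract_syllable_patterns_py extract_syllable_patterns_py_alt
  simp only []
  cases hcs : word.toList with
  | nil =>
    rw [PySem.List.pyRange_one_eq_nil (by simp)]
    simp
  | cons c rest =>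
    have h1 : (c :: rest).length ≥ 1 := by simp
    have hstep : pvAstep ([], []) c = ([], [c]) := by simp [pvAstep]
    have := pv_key (c :: rest) ((c :: rest).length - 1) 1 0 [] rfl (by omega) (by omega) (by omega)
    simp only [List.drop_one, List.drop_zero, List.tail_cons] at this
    rw [show (c :: rest).take (1 - 0) = [c] by simp] at this
    show pvAfin ((c :: rest).foldl pvAstep ([], [])) = pvBfin (c :: rest) _
    rw [List.foldl_cons, hstep]
    exact this
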